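-- pv_equiv track=rewrite | github.com/umazhar/FlyPad-System | Desktop/Code/STROBE/SOFTWARE/STROBE_postprocessing/strobelib.py | cumulative_sips
-- ===== SOURCE A (Python) =====
-- LED_GRAPHICAL_SCALE = 2000;
--
-- LED_ON = 1
--
-- LED_OFF = 0
--
-- def cumulative_sips(LED_values):
--     cumulative_rising_edges = []
--     LED_value_prev = 0
--     num_rising_edges = 0
--     for LED_value in LED_values:
--         if (LED_value == LED_GRAPHICAL_SCALE * LED_ON) and (LED_value_prev == LED_OFF):
--             num_rising_edges += 1
--         cumulative_rising_edges.append(num_rising_edges)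
--         LED_value_prev = LED_value
--     return cumulative_rising_edges
-- ===== SOURCE B (Python) =====
-- LED_GRAPHICAL_SCALE = 2000
--
-- LED_ON = 1
--
-- LED_OFF = 0
--
-- def cumulative_sips(LED_values):
--     vals = list(LED_values)
--     # positions where a rising edge occurs
--     edge_idx = [i for i, (prev, cur) in enumerate(zip([LED_OFF] + vals, vals))
--                 if cur == LED_GRAPHICAL_SCALE * LED_ON and prev == LED_OFF]
--     # build the output block-wise: between consecutive edges the count is constant
--     out = []
--     count = 0
--     for start, stop in zip([0] + edge_idx, edge_idx + [len(vals)]):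
--         out += [count] * (stop - start)
--         count += 1
--     return out
-- ===== Notes on version B (the rewrite author's own statement) =====
-- stated objective: alternative
-- what changed: Replaces the single stateful running-count scan by a two-stage algorithm: first collect the positions of the rising edges, then construct the output block-wise by run-length expansion of the gaps between consecutive edge positions (each gap is filled with the repeated constant count of edges seen so far).
import Mathlib
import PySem

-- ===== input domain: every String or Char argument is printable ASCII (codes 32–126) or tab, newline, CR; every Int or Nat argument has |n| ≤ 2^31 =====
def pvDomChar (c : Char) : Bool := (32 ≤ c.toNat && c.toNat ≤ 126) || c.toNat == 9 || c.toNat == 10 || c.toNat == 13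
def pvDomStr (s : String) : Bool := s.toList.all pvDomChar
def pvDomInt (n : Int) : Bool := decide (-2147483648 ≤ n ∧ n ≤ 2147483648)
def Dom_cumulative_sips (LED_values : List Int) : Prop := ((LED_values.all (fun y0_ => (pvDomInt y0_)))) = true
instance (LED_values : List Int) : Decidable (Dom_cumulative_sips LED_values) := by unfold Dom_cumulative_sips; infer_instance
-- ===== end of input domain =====

-- B replaces A's single stateful running-count scan by edge-position collection followed by
-- run-length expansion of the gaps between consecutive edge positions (alternative structure, same cost).

-- ===== PORT A =====
-- A: one loop carrying (output list, previous value, running count).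
def cumulative_sips (LED_values : List Int) : List Int :=
  (LED_values.foldl
    (fun (st : List Int × Int × Int) v =>
      let n := if v = 2000 * 1 ∧ st.2.1 = 0 then st.2.2 + 1 else st.2.2
      (st.1 ++ [n], v, n))
    ([], 0, 0)).1

-- ===== PORT B =====
-- edge positions: enumerate(zip([0]+vals, vals)), keep the index where (prev, cur) is a rising edge
def pvEdgeIdx (vals : List Int) : List Int :=
  (PySem.List.enumerate (List.zip ((0:Int) :: vals) vals) 0).filterMap
    (fun p => if p.2.2 = 2000 * 1 ∧ p.2.1 = 0 then some p.1 else none)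

-- the loop 'for start, stop in …: out += [count]*(stop-start); count += 1'
def pvExpand (count : Int) : List (Int × Int) → List Int
  | [] => []
  | (start, stop) :: rest => List.replicate (stop - start).toNat count ++ pvExpand (count + 1) rest

def cumulative_sips_alt (LED_values : List Int) : List Int :=
  let e := pvEdgeIdx LED_values
  pvExpand 0 (List.zip (0 :: e) (e ++ [PySem.List.len LED_values]))

-- ===== PRECONDITION & SPEC =====
def Spec_cumulative_sips (LED_values : List Int) (out : List Int) : Prop := out = cumulative_sips_alt LED_values
instance (LED_values : List Int) (out : List Int) : Decidable (Spec_cumulative_sips LED_values out) := by unfold Spec_cumulative_sips; infer_instance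

-- ===== CLAIM =====
def Claim_equal_cumulative_sips : Prop := ∀ (LED_values : List Int), Dom_cumulative_sips LED_values → Spec_cumulative_sips LED_values (cumulative_sips LED_values)

-- ===== LEMMAS AND PROOFS =====

-- proof-side: edge positions starting at offset p with predecessor prev
def pvIdx : Int → Int → List Int → List Int
  | _, _, [] => []
  | p, prev, x :: xs => (if x = 2000 ∧ prev = 0 then [p] else []) ++ pvIdx (p+1) x xs

-- proof-side: A's stream of running counts, started at count c with predecessor prev
def pvAcc2 : Int → Int → List Int → List Int
  | _, _, [] => []
  | c, prev, x :: xs =>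
      let m := if x = 2000 ∧ prev = 0 then c + 1 else c
      m :: pvAcc2 m x xs

theorem pvEdgeIdx_eq (xs : List Int) : ∀ (prev s : Int),
    (PySem.List.enumerate (List.zip (prev :: xs) xs) s).filterMap
      (fun p => if p.2.2 = 2000 ∧ p.2.1 = 0 then some p.1 else none)
    = pvIdx s prev xs := by
  induction xs with
  | nil => intro prev s; simp [pvIdx, PySem.List.enumerate_nil]
  | cons x xs ih =>
    intro prev s
    simp only [List.zip_cons_cons, PySem.List.enumerate_cons, List.filterMap_cons, pvIdx]
    by_cases h : x = 2000 ∧ prev = 0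
    · rw [if_pos h, if_pos h, List.singleton_append, ih]
    · rw [if_neg h, if_neg h, List.nil_append, ih]

theorem pvIdx_ge (xs : List Int) : ∀ (p prev : Int), ∀ a ∈ pvIdx p prev xs, p ≤ a := by
  induction xs with
  | nil => intro p prev a ha; simp [pvIdx] at ha
  | cons x xs ih =>
    intro p prev a ha
    simp only [pvIdx, List.mem_append] at ha
    rcases ha with ha | ha
    · split at ha <;> simp at ha; omega
    · have := ih (p+1) x a ha; omega

theorem pvExpand_shift (e : List Int) (c p q : Int)
    (he : ∀ a ∈ e, p + 1 ≤ a) (hq : p + 1 ≤ q) :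
    pvExpand c (List.zip (p :: e) (e ++ [q]))
      = c :: pvExpand c (List.zip ((p+1) :: e) (e ++ [q])) := by
  cases e with
  | nil =>
    simp only [List.nil_append, List.zip_cons_cons, List.zip_nil_right, pvExpand]
    have h1 : (q - p).toNat = (q - (p+1)).toNat + 1 := by omega
    simp [h1, List.replicate_succ]
  | cons a e' =>
    have ha : p + 1 ≤ a := he a (by simp)
    simp only [List.cons_append, List.zip_cons_cons, pvExpand]
    have h1 : (a - p).toNat = (a - (p+1)).toNat + 1 := by omega
    simp [h1, List.replicate_succ]

theorem pvExpand_eq_acc (xs : List Int) : ∀ (p prev c : Int),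
    pvExpand c (List.zip (p :: pvIdx p prev xs) (pvIdx p prev xs ++ [p + xs.length]))
      = pvAcc2 c prev xs := by
  induction xs with
  | nil => intro p prev c; simp [pvIdx, pvAcc2, pvExpand]
  | cons x xs ih =>
    intro p prev c
    have hge : ∀ a ∈ pvIdx (p+1) x xs, p + 1 ≤ a := pvIdx_ge xs (p+1) x
    have hlen : (p : Int) + (x :: xs).length = (p + 1) + xs.length := by
      simp; ring
    rw [hlen]
    by_cases h : x = 2000 ∧ prev = 0
    · simp only [pvIdx, if_pos h, List.singleton_append, pvAcc2]
      simp only [List.cons_append, List.zip_cons_cons, pvExpand, sub_self,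
        Int.toNat_zero, List.replicate_zero, List.nil_append]
      rw [pvExpand_shift _ (c+1) p _ hge (by omega)]
      rw [ih (p+1) x (c+1)]
    · simp only [pvIdx, if_neg h, List.nil_append, pvAcc2]
      rw [pvExpand_shift _ c p _ hge (by omega), ih (p+1) x c]

theorem cumulative_sips_fold_eq (xs : List Int) : ∀ (acc : List Int) (prev n : Int),
    (xs.foldl
      (fun (st : List Int × Int × Int) v =>
        let m := if v = 2000 * 1 ∧ st.2.1 = 0 then st.2.2 + 1 else st.2.2
        (st.1 ++ [m], v, m))
      (acc, prev, n)).1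
    = acc ++ pvAcc2 n prev xs := by
  induction xs with
  | nil => intro acc prev n; simp [pvAcc2]
  | cons x xs ih =>
    intro acc prev n
    rw [List.foldl_cons]
    refine Eq.trans (ih (acc ++ [if x = 2000 * 1 ∧ prev = 0 then n + 1 else n]) x
      (if x = 2000 * 1 ∧ prev = 0 then n + 1 else n)) ?_
    by_cases h : x = 2000 ∧ prev = 0 <;> simp [pvAcc2, h, List.append_assoc]

-- ===== VERDICT =====
theorem cumulative_sips_spec : Claim_equal_cumulative_sips := by
  intro xs _
  unfold Spec_cumulative_sips cumulative_sips cumulative_sips_alt pvEdgeIdx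
  rw [cumulative_sips_fold_eq]
  simp only [mul_one]
  rw [pvEdgeIdx_eq]
  have := pvExpand_eq_acc xs 0 0 0
  simp only [zero_add] at this
  simp [PySem.List.len_eq, ← this]
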